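-- pv_equiv track=rewrite | github.com/chowdhary-sandeep/20questions | envs/nanogpt_speedrun/nanogpt_speedrun.py | normalize_patch
-- ===== SOURCE A (Python) =====
-- def normalize_patch(patch: str) -> str:
--     out_lines = []
--     lines = patch.splitlines(keepends=True)
--     i = 0
--     while i < len(lines):
--         line = lines[i]
--         if line.startswith("@@"):
--             # start of hunk
--             j = i + 1
--             minus, plus, context = 0, 0, 0
--             body = []
--             while j < len(lines) and not lines[j].startswith("@@") and not lines[j].startswith(("---", "+++")):
--                 body.append(lines[j])
--                 if lines[j].startswith("-"):
--                     minus += 1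
--                 elif lines[j].startswith("+"):
--                     plus += 1
--                 elif lines[j].startswith(" ") or lines[j] == "\n":
--                     context += 1
--                 else:
--                     raise ValueError(f"Invalid patch line: {lines[j]!r}")
--                 j += 1
--             if minus == 0 and plus == 0:
--                 # Drop this hunk entirely (no changes)
--                 i = j
--                 continue
--             header = f"@@ -1,{minus + context} +1,{plus + context} @@\n"
--             out_lines.append(header)
--             out_lines.extend(body)
--             i = j
--         else:
--             out_lines.append(line)
--             i += 1
--     return "".join(out_lines)
-- ===== SOURCE B (Python) =====
-- def normalize_patch(patch: str) -> str:
--     out = []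
--     in_hunk = False
--     minus = plus = context = 0
--     body = []
--     for line in patch.splitlines(keepends=True):
--         if in_hunk and (line.startswith("@@") or line.startswith("---") or line.startswith("+++")):
--             # flush the pending hunk before reprocessing this line
--             if minus != 0 or plus != 0:
--                 out.append(f"@@ -1,{minus + context} +1,{plus + context} @@\n")
--                 out.extend(body)
--             in_hunk, minus, plus, context, body = False, 0, 0, 0, []
--         if in_hunk:
--             body.append(line)
--             if line.startswith("-"):
--                 minus += 1
--             elif line.startswith("+"):
--                 plus += 1
--             elif line.startswith(" ") or line == "\n":
--                 context += 1
--             else: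
--                 raise ValueError(f"Invalid patch line: {line!r}")
--         elif line.startswith("@@"):
--             in_hunk = True
--         else:
--             out.append(line)
--     if in_hunk and (minus != 0 or plus != 0):
--         out.append(f"@@ -1,{minus + context} +1,{plus + context} @@\n")
--         out.extend(body)
--     return "".join(out)
-- ===== Notes on version B (the rewrite author's own statement) =====
-- stated objective: alternative
-- what changed: Replaced A's nested while loops with index jumping (outer loop plus an inner body-scanning loop restarting the index) by a single flat pass over the lines with an explicit state machine (in_hunk flag, pending body and minus/plus/context counts) that flushes the pending hunk whenever a hunk-boundary line arrives or at end of input.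
import Mathlib
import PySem

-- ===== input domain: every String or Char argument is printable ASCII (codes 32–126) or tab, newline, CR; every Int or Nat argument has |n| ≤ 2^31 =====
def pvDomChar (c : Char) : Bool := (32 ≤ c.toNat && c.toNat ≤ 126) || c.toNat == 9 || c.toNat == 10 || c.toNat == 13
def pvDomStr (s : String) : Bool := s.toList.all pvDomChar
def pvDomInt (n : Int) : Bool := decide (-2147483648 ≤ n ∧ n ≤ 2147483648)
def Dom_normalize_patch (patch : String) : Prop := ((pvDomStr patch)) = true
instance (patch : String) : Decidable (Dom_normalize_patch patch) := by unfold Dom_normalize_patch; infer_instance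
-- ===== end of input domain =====

-- B is the same normalization rewritten as a single flat state-machine pass (different decomposition,
-- same cost); equality of the RETURN value is proved; Pre_ excludes exactly the inputs where A raises ValueError.

-- shared helpers: str.splitlines(keepends=True), exact on Dom (only '\n', '\r\n', '\r' are
-- line breaks there; Python's further break characters lie outside Dom)
def pvSplitKeep : List Char → List Char → List (List Char)
  | [], cur => if cur.isEmpty then [] else [cur.reverse]
  | '\r' :: '\n' :: rest, cur => ('\n' :: '\r' :: cur).reverse :: pvSplitKeep rest []
  | '\r' :: rest, cur => ('\r' :: cur).reverse :: pvSplitKeep rest []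
  | '\n' :: rest, cur => ('\n' :: cur).reverse :: pvSplitKeep rest []
  | c :: rest, cur => pvSplitKeep rest (c :: cur)

-- lines that terminate a hunk body scan: startswith "@@" / "---" / "+++"
def pvStops (l : List Char) : Bool :=
  PySem.Chars.startswith l ['@', '@'] || PySem.Chars.startswith l ['-', '-', '-'] ||
    PySem.Chars.startswith l ['+', '+', '+']

-- the if/elif classification chain both Pythons share; none = ValueError
def pvClassify (l : List Char) : Option (Int × Int × Int) :=
  if PySem.Chars.startswith l ['-'] then some (1, 0, 0)
  else if PySem.Chars.startswith l ['+'] then some (0, 1, 0)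
  else if PySem.Chars.startswith l [' '] || l == ['\n'] then some (0, 0, 1)
  else none

-- f"@@ -1,{minus + context} +1,{plus + context} @@\n"
def pvHeader (m p c : Int) : List Char :=
  "@@ -1,".toList ++ (PySem.Int.toStr (m + c)).toList ++ " +1,".toList ++
    (PySem.Int.toStr (p + c)).toList ++ " @@\n".toList

-- ===== PORT A =====
-- the inner while loop: consumes body lines until a stopper, returns (body, minus, plus, context, rest)
def pvScanA : List (List Char) → Option (List (List Char) × Int × Int × Int × List (List Char))
  | [] => some ([], 0, 0, 0, [])
  | l :: rest =>
    if pvStops l then some ([], 0, 0, 0, l :: rest)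
    else
      match pvClassify l with
      | none => none
      | some (dm, dp, dc) =>
        match pvScanA rest with
        | none => none
        | some (b, m, p, c, r) => some (l :: b, dm + m, dp + p, dc + c, r)

-- termination lemma for the outer loop (cited by pvOuterA's decreasing_by)
theorem pvScanA_rest_le :
    ∀ (rest b : List (List Char)) (m p c : Int) (r : List (List Char)),
      pvScanA rest = some (b, m, p, c, r) → r.length ≤ rest.length := by
  intro rest
  induction rest with
  | nil => intro b m p c r h; simp [pvScanA] at h; simp [h.2.2.2.2]
  | cons l rest ih =>
    intro b m p c r h
    simp only [pvScanA] at h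
    by_cases hs : pvStops l = true
    · simp [hs] at h; simp [h.2.2.2.2]
    · simp [hs] at h
      cases hc : pvClassify l with
      | none => simp [hc] at h
      | some d =>
        obtain ⟨dm, dp, dc⟩ := d
        simp [hc] at h
        cases hr : pvScanA rest with
        | none => simp [hr] at h
        | some t =>
          obtain ⟨b2, m2, p2, c2, r2⟩ := t
          simp [hr] at h
          have := ih b2 m2 p2 c2 r2 hr
          simp [← h.2.2.2.2]
          omega

-- the outer while loop of A
def pvOuterA : List (List Char) → Option (List (List Char))
  | [] => some []
  | l :: rest =>
    if PySem.Chars.startswith l ['@', '@'] then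
      match hs : pvScanA rest with
      | none => none
      | some (body, m, p, c, r) =>
        if m == 0 && p == 0 then pvOuterA r
        else
          match pvOuterA r with
          | none => none
          | some o => some (pvHeader m p c :: body ++ o)
    else
      match pvOuterA rest with
      | none => none
      | some o => some (l :: o)
termination_by ls => ls.length
decreasing_by
  · have := pvScanA_rest_le rest body m p c r hs; simp; omega
  · have := pvScanA_rest_le rest body m p c r hs; simp; omega
  · simp

def normalize_patch (patch : String) : String :=
  match pvOuterA (pvSplitKeep patch.toList []) with
  | none => ""   -- the Python raises ValueError here; excluded by Pre_
  | some out => String.mk out.flatten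

-- ===== PORT B =====
-- if minus or plus: out.append(header); out.extend(body)
def pvFlush (out : List (List Char)) (m p c : Int) (body : List (List Char)) : List (List Char) :=
  if m == 0 && p == 0 then out else out ++ pvHeader m p c :: body

-- B's single flat loop: state = (in_hunk, minus, plus, context, body, out);
-- pvHandleB is the loop body after the flush-on-stopper step: none = ValueError, some = the next state
def pvHandleB (l : List Char) (inHunk : Bool) (m p c : Int) (body out : List (List Char)) :
    Option (Bool × Int × Int × Int × List (List Char) × List (List Char)) :=
  if inHunk then
    match pvClassify l with
    | none => none
    | some (dm, dp, dc) => some (true, m + dm, p + dp, c + dc, body ++ [l], out)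
  else if PySem.Chars.startswith l ['@', '@'] then some (true, 0, 0, 0, [], out)
  else some (false, 0, 0, 0, [], out ++ [l])

def pvLoopB : List (List Char) → Bool → Int → Int → Int → List (List Char) → List (List Char) →
    Option (List (List Char))
  | [], inHunk, m, p, c, body, out =>
    some (if inHunk then pvFlush out m p c body else out)
  | l :: rest, inHunk, m, p, c, body, out =>
    match (if inHunk && pvStops l then
            ((false, 0, 0, 0, [], pvFlush out m p c body) :
              Bool × Int × Int × Int × List (List Char) × List (List Char))
           else (inHunk, m, p, c, body, out)) with
    | (h0, m0, p0, c0, b0, o0) =>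
      match pvHandleB l h0 m0 p0 c0 b0 o0 with
      | none => none
      | some (h1, m1, p1, c1, b1, o1) => pvLoopB rest h1 m1 p1 c1 b1 o1

def normalize_patch_alt (patch : String) : String :=
  match pvLoopB (pvSplitKeep patch.toList []) false 0 0 0 [] [] with
  | none => ""
  | some out => String.mk out.flatten

-- ===== PRECONDITION & SPEC =====
-- a line A accepts inside a hunk body
def pvPreOk (l : List Char) : Bool :=
  PySem.Chars.startswith l ['-'] || PySem.Chars.startswith l ['+'] ||
    PySem.Chars.startswith l [' '] || l == ['\n']

-- Pre_ excludes exactly the inputs on which A raises ValueError: some hunk-body line (a line whose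
-- nearest preceding stopper line is a hunk header, pvStops/startswith ['@','@'] below) fails the
-- pvPreOk classification. B raises there too; both Lean ports encode the raise as the none branch,
-- so the port equality below happens to hold unconditionally and the proof does not need Pre_.
def Pre_normalize_patch (patch : String) : Prop :=
  ((List.range (pvSplitKeep patch.toList []).length).all fun k =>
    (List.range k).all fun i =>
      !(PySem.Chars.startswith ((pvSplitKeep patch.toList []).getD i []) ['@', '@']) ||
      !((List.range k).all fun j =>
          !(decide (i < j)) || !(pvStops ((pvSplitKeep patch.toList []).getD j []))) ||
      pvStops ((pvSplitKeep patch.toList []).getD k []) ||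
      pvPreOk ((pvSplitKeep patch.toList []).getD k [])) = true
instance (patch : String) : Decidable (Pre_normalize_patch patch) := by
  unfold Pre_normalize_patch; infer_instance

def pvWitness_normalize_patch : String := "pre\n@@ hdr\n-a\n+b\n c\n"

def Spec_normalize_patch (patch : String) (out : String) : Prop := out = normalize_patch_alt patch
instance (patch : String) (out : String) : Decidable (Spec_normalize_patch patch out) := by
  unfold Spec_normalize_patch; infer_instance

-- ===== CLAIM (what is proved, stated in full; the proofs are below) =====
def Claim_equal_normalize_patch : Prop :=
  ∀ (patch : String), Dom_normalize_patch patch → Pre_normalize_patch patch →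
    Spec_normalize_patch patch (normalize_patch patch)

-- ===== LEMMAS AND PROOFS =====
theorem pvWitness_ok :
    Dom_normalize_patch pvWitness_normalize_patch ∧ Pre_normalize_patch pvWitness_normalize_patch := by
  constructor
  · decide
  · decide

-- B's loop in the in-hunk state consumes exactly what A's inner scan consumes
theorem pvLoopB_inHunk :
    ∀ (rest : List (List Char)) (m p c : Int) (body out : List (List Char)),
      pvLoopB rest true m p c body out =
        match pvScanA rest with
        | none => none
        | some (b, dm, dp, dc, r) =>
            pvLoopB r false 0 0 0 [] (pvFlush out (m + dm) (p + dp) (c + dc) (body ++ b)) := by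
  intro rest
  induction rest with
  | nil => intro m p c body out; simp [pvLoopB, pvScanA]
  | cons l rest ih =>
    intro m p c body out
    by_cases hs : pvStops l = true
    · simp [pvLoopB, pvScanA, hs]
    · cases hc : pvClassify l with
      | none => simp [pvLoopB, pvScanA, pvHandleB, hs, hc]
      | some d =>
        obtain ⟨dm, dp, dc⟩ := d
        simp only [pvLoopB, pvScanA, pvHandleB, hs, hc, Bool.true_and, Bool.false_eq_true,
          not_false_eq_true, if_neg, if_pos]
        rw [ih]
        cases hr : pvScanA rest with
        | none => simp
        | some t =>
          obtain ⟨b2, m2, p2, c2, r2⟩ := t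
          simp [add_assoc, List.append_assoc]

-- the main correspondence: B's flat loop (not in a hunk) equals A's outer loop, prefixed by out
theorem pvLoopB_outer :
    ∀ (n : Nat) (lines : List (List Char)), lines.length ≤ n → ∀ (out : List (List Char)),
      pvLoopB lines false 0 0 0 [] out = (pvOuterA lines).map (out ++ ·) := by
  intro n
  induction n with
  | zero =>
    intro lines h out
    have : lines = [] := by cases lines <;> simp_all
    subst this
    simp [pvLoopB, pvOuterA]
  | succ n ih =>
    intro lines h out
    cases lines with
    | nil => simp [pvLoopB, pvOuterA]
    | cons l rest =>
      by_cases hat : PySem.Chars.startswith l ['@', '@'] = true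
      · have h1 : pvLoopB (l :: rest) false 0 0 0 [] out = pvLoopB rest true 0 0 0 [] out := by
          simp [pvLoopB, pvHandleB, hat]
        rw [h1, pvLoopB_inHunk]
        rw [pvOuterA]
        simp only [hat, if_pos]
        cases hr : pvScanA rest with
        | none => simp
        | some t =>
          obtain ⟨b, m, p, c, r⟩ := t
          have hrle : r.length ≤ rest.length := pvScanA_rest_le rest b m p c r hr
          have hrn : r.length ≤ n := by simp at h; omega
          simp only [zero_add, List.nil_append, pvFlush]
          by_cases hz : (m == 0 && p == 0) = true
          · simp only [hz, if_pos]
            exact ih r hrn out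
          · simp only [hz, if_neg, Bool.false_eq_true, not_false_eq_true]
            rw [ih r hrn]
            cases pvOuterA r <;> simp
      · have h1 : pvLoopB (l :: rest) false 0 0 0 [] out
            = pvLoopB rest false 0 0 0 [] (out ++ [l]) := by
          simp [pvLoopB, pvHandleB, hat]
        rw [h1, ih rest (by simp at h; omega)]
        rw [pvOuterA]
        simp only [hat, Bool.false_eq_true, not_false_eq_true, if_neg]
        cases pvOuterA rest <;> simp

theorem ports_equal (patch : String) : normalize_patch patch = normalize_patch_alt patch := by
  unfold normalize_patch normalize_patch_alt
  rw [pvLoopB_outer (pvSplitKeep patch.toList []).length _ le_rfl]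
  cases pvOuterA (pvSplitKeep patch.toList []) <;> simp

-- ===== VERDICT (by name: the statement is the Claim_ definition above) =====
theorem normalize_patch_spec : Claim_equal_normalize_patch := by
  intro patch _ _
  unfold Spec_normalize_patch
  exact ports_equal patch
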